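-- pv_equiv track=rewrite | github.com/yuyuliu11037/HypPlan | src/oracle_nqueens.py | format_gold_trajectory
-- ===== SOURCE A (Python) =====
-- def _conflicts(placed: list[tuple[int, int]], r: int, c: int) -> bool:
--     """True if a queen at (r,c) attacks any queen in `placed` (1-indexed)."""
--     for (rp, cp) in placed:
--         if cp == c:
--             return True
--         if abs(rp - r) == abs(cp - c):
--             return True
--     return False
--
-- def available_columns(N: int, placed: list[tuple[int, int]],
--                       next_row: int) -> list[int]:
--     """Return sorted list of 1-indexed columns where a queen can be safely
--     placed at row `next_row` given prior `placed` queens."""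
--     return [c for c in range(1, N + 1)
--             if not _conflicts(placed, next_row, c)]
--
-- def format_gold_trajectory(N: int, solution: list[int]) -> str:
--     """Render the canonical step-by-step trajectory text for `solution`."""
--     lines = [f"Board size: {N}"]
--     placed: list[tuple[int, int]] = []
--     for k, c in enumerate(solution, 1):
--         placed.append((k, c))
--         lines.append(f"Step {k}: Place queen in row {k} at column {c}.")
--         placed_str = ",".join(f"({r},{cc})" for r, cc in placed)
--         lines.append(f"  Placed: [{placed_str}]")
--         if k < N:
--             avail = available_columns(N, placed, k + 1)
--             avail_str = ", ".join(str(x) for x in avail)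
--             lines.append(f"  Available for row {k+1}: [{avail_str}]")
--     sol_str = ", ".join(str(c) for c in solution)
--     lines.append(f"Solution: [{sol_str}]")
--     return "\n".join(lines)
-- ===== SOURCE B (Python) =====
-- def format_gold_trajectory(N: int, solution: list[int]) -> str:
--     """Render the canonical step-by-step trajectory text for `solution`."""
--
--     def step_block(k: int, c: int, placed: list[tuple[int, int]]) -> list[str]:
--         block = [f"Step {k}: Place queen in row {k} at column {c}.",
--                  "  Placed: [" + ",".join(f"({r},{cc})" for r, cc in placed) + "]"]
--         if k < N:
--             # attacked columns computed arithmetically from each placed queen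
--             forbidden = set()
--             for rp, cp in placed:
--                 d = (k + 1) - rp
--                 forbidden.update((cp, cp + d, cp - d))
--             avail = sorted(set(range(1, N + 1)) - forbidden)
--             block.append(f"  Available for row {k+1}: [" + ", ".join(str(x) for x in avail) + "]")
--         return block
--
--     blocks = [step_block(k, c, list(enumerate(solution[:k], 1)))
--               for k, c in enumerate(solution, 1)]
--     lines = ([f"Board size: {N}"]
--              + [line for b in blocks for line in b]
--              + [f"Solution: [{', '.join(str(c) for c in solution)}]"])
--     return "\n".join(lines)
-- ===== Notes on version B (the rewrite author's own statement) =====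
-- stated objective: alternative
-- what changed: Available columns are computed by accumulating the three arithmetically-attacked columns of each placed queen into a forbidden set and sorting the complement of 1..N, instead of testing every column against every queen; the rendering is decomposed into per-step blocks recomputed from the solution prefix instead of threading a mutable placed accumulator.
import Mathlib
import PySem

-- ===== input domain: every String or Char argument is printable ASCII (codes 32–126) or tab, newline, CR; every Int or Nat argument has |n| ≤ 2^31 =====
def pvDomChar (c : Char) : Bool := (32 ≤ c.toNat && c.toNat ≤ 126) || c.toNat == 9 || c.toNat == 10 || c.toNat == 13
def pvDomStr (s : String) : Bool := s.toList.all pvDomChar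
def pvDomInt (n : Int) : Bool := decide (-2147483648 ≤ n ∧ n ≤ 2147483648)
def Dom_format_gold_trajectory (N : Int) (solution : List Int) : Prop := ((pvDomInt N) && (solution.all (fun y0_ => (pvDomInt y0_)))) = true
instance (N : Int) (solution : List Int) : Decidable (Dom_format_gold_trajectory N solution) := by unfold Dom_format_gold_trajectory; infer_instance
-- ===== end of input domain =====

-- B computes the available columns by accumulating each queen's three attacked columns into a
-- forbidden set and sorting the complement of 1..N, and renders per-step blocks recomputed from
-- the solution prefix instead of threading a placed accumulator (alternative decomposition).

-- ===== PORT A =====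
-- shared formatting of the "Placed: [...]" payload (identical f-string join in both Pythons)
def placedStr (placed : List (Int × Int)) : String :=
  PySem.Str.join "," (placed.map (fun p => "(" ++ PySem.Int.toStr p.1 ++ "," ++ PySem.Int.toStr p.2 ++ ")"))

def conflictsA : List (Int × Int) → Int → Int → Bool
  | [], _, _ => false
  | (rp, cp) :: rest, r, c =>
    if cp == c then true
    else if (rp - r).natAbs == (cp - c).natAbs then true
    else conflictsA rest r c

def availA (N : Int) (placed : List (Int × Int)) (next_row : Int) : List Int :=
  (PySem.List.pyRange 1 (N + 1) 1).filter (fun c => !conflictsA placed next_row c)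

def loopA (N : Int) : List Int → Int → List (Int × Int) → List String → List String
  | [], _, _, lines => lines
  | c :: rest, k, placed, lines =>
    let placed' := placed ++ [(k, c)]
    let lines1 := lines ++ ["Step " ++ PySem.Int.toStr k ++ ": Place queen in row " ++ PySem.Int.toStr k ++ " at column " ++ PySem.Int.toStr c ++ "."]
    let lines2 := lines1 ++ ["  Placed: [" ++ placedStr placed' ++ "]"]
    let lines3 :=
      if k < N then
        lines2 ++ ["  Available for row " ++ PySem.Int.toStr (k + 1) ++ ": [" ++ PySem.Str.join ", " ((availA N placed' (k + 1)).map PySem.Int.toStr) ++ "]"]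
      else lines2
    loopA N rest (k + 1) placed' lines3

def format_gold_trajectory (N : Int) (solution : List Int) : String :=
  PySem.Str.join "\n"
    (loopA N solution 1 [] ["Board size: " ++ PySem.Int.toStr N]
      ++ ["Solution: [" ++ PySem.Str.join ", " (solution.map PySem.Int.toStr) ++ "]"])

-- ===== PORT B =====
def forbiddenB (placed : List (Int × Int)) (nr : Int) : PySem.Set Int :=
  placed.foldl (fun s p => PySem.Set.update s [p.2, p.2 + (nr - p.1), p.2 - (nr - p.1)]) PySem.Set.empty

def stepBlockB (N k c : Int) (placed : List (Int × Int)) : List String :=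
  ["Step " ++ PySem.Int.toStr k ++ ": Place queen in row " ++ PySem.Int.toStr k ++ " at column " ++ PySem.Int.toStr c ++ ".",
   "  Placed: [" ++ placedStr placed ++ "]"]
  ++ (if k < N then
        ["  Available for row " ++ PySem.Int.toStr (k + 1) ++ ": ["
          ++ PySem.Str.join ", "
               ((PySem.List.sorted
                   (PySem.Set.diff (PySem.Set.ofList (PySem.List.pyRange 1 (N + 1) 1)) (forbiddenB placed (k + 1)))
                   (fun x => x) false).map PySem.Int.toStr)
          ++ "]"]
      else [])

def format_gold_trajectory_alt (N : Int) (solution : List Int) : String :=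
  let blocks := (PySem.List.enumerate solution 1).map
    (fun kc => stepBlockB N kc.1 kc.2 (PySem.List.enumerate (PySem.List.slice solution none (some kc.1)) 1))
  PySem.Str.join "\n"
    (["Board size: " ++ PySem.Int.toStr N]
      ++ blocks.flatMap (fun b => b)
      ++ ["Solution: [" ++ PySem.Str.join ", " (solution.map PySem.Int.toStr) ++ "]"])

-- ===== PRECONDITION & SPEC =====
def Spec_format_gold_trajectory (N : Int) (solution : List Int) (out : String) : Prop := out = format_gold_trajectory_alt N solution
instance (N : Int) (solution : List Int) (out : String) : Decidable (Spec_format_gold_trajectory N solution out) := by unfold Spec_format_gold_trajectory; infer_instance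

-- ===== CLAIM (what is proved, stated in full; the proofs are below) =====
def Claim_equal_format_gold_trajectory : Prop := ∀ (N : Int) (solution : List Int), Dom_format_gold_trajectory N solution → Spec_format_gold_trajectory N solution (format_gold_trajectory N solution)

-- ===== LEMMAS AND PROOFS =====

lemma conflictsA_iff (placed : List (Int × Int)) (r c : Int) :
    conflictsA placed r c = true ↔ ∃ p ∈ placed, p.2 = c ∨ (p.1 - r).natAbs = (p.2 - c).natAbs := by
  induction placed with
  | nil => simp [conflictsA]
  | cons q rest ih =>
    obtain ⟨rp, cp⟩ := q
    by_cases h1 : cp = c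
    · simp [conflictsA, h1]
    · by_cases h2 : (rp - r).natAbs = (cp - c).natAbs
      · simp [conflictsA, h1, h2]
      · simp [conflictsA, h1, h2, ih]

lemma mem_forbiddenB_aux (placed : List (Int × Int)) (nr c : Int) (s : PySem.Set Int) :
    c ∈ placed.foldl (fun s p => PySem.Set.update s [p.2, p.2 + (nr - p.1), p.2 - (nr - p.1)]) s ↔
      c ∈ s ∨ ∃ p ∈ placed, c = p.2 ∨ c = p.2 + (nr - p.1) ∨ c = p.2 - (nr - p.1) := by
  induction placed generalizing s with
  | nil => simp
  | cons q rest ih =>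
    simp only [List.foldl_cons, ih, PySem.Set.mem_update, List.mem_cons, List.not_mem_nil,
      or_false, exists_eq_or_imp]
    exact or_assoc

lemma mem_forbiddenB (placed : List (Int × Int)) (nr c : Int) :
    c ∈ forbiddenB placed nr ↔ ∃ p ∈ placed, c = p.2 ∨ c = p.2 + (nr - p.1) ∨ c = p.2 - (nr - p.1) := by
  unfold forbiddenB
  rw [mem_forbiddenB_aux]
  simp [PySem.Set.empty]

lemma forbidden_iff_conflicts (placed : List (Int × Int)) (nr c : Int)
    (h : ∀ p ∈ placed, p.1 < nr) :
    c ∈ forbiddenB placed nr ↔ conflictsA placed nr c = true := by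
  rw [mem_forbiddenB, conflictsA_iff]
  constructor
  · rintro ⟨p, hp, hc⟩
    refine ⟨p, hp, ?_⟩
    have := h p hp
    rcases hc with h1 | h1 | h1 <;> [exact Or.inl h1.symm; exact Or.inr (by omega); exact Or.inr (by omega)]
  · rintro ⟨p, hp, hc⟩
    refine ⟨p, hp, ?_⟩
    have := h p hp
    rcases hc with h1 | h1
    · exact Or.inl h1.symm
    · omega

lemma availB_eq_availA (N : Int) (placed : List (Int × Int)) (nr : Int)
    (h : ∀ p ∈ placed, p.1 < nr) :
    PySem.List.sorted
      (PySem.Set.diff (PySem.Set.ofList (PySem.List.pyRange 1 (N + 1) 1)) (forbiddenB placed nr))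
      (fun x => x) false = availA N placed nr := by
  apply PySem.List.sorted_eq_of_perm_of_pairwise_lt
  · rw [List.perm_ext_iff_of_nodup]
    · intro c
      rw [PySem.Set.mem_diff]
      simp only [availA, List.mem_filter, PySem.Set.mem_ofList, Bool.not_eq_eq_eq_not, Bool.not_true,
        forbidden_iff_conflicts placed nr c h]
      constructor
      · rintro ⟨h1, h2⟩; exact ⟨h1, by simpa using h2⟩
      · rintro ⟨h1, h2⟩; exact ⟨h1, by simpa using h2⟩
    · exact List.Nodup.filter _ (PySem.List.nodup_pyRange_one 1 (N + 1))
    · exact PySem.Set.nodup_diff _ _ (PySem.Set.nodup_ofList _)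
  · exact (PySem.List.pairwise_lt_pyRange_one ..).filter _

lemma mem_enumerate_fst_lt (l : List Int) (s : Int) (p : Int × Int) (hp : p ∈ PySem.List.enumerate l s) :
    s ≤ p.1 ∧ p.1 < s + l.length := by
  have : p.1 ∈ (PySem.List.enumerate l s).map (·.1) := List.mem_map_of_mem hp
  rw [PySem.List.map_fst_enumerate] at this
  exact (PySem.List.mem_pyRange_one).1 this

lemma slice_prefix (pre : List Int) (c : Int) (rest : List Int) :
    PySem.List.slice (pre ++ c :: rest) none (some ((pre.length : Int) + 1)) = pre ++ [c] := by
  have h : ((pre.length : Int) + 1) = ((pre.length + 1 : Nat) : Int) := by push_cast; ring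
  rw [h, PySem.List.slice_to_natCast]
  simp [List.take_append]

lemma loopA_eq (N : Int) (rest : List Int) : ∀ (pre : List Int) (lines : List String),
    loopA N rest ((pre.length : Int) + 1) (PySem.List.enumerate pre 1) lines
      = lines ++ ((PySem.List.enumerate rest ((pre.length : Int) + 1)).map
          (fun kc => stepBlockB N kc.1 kc.2
            (PySem.List.enumerate (PySem.List.slice (pre ++ rest) none (some kc.1)) 1))).flatMap (fun b => b) := by
  induction rest with
  | nil => intro pre lines; simp [loopA, PySem.List.enumerate_nil]
  | cons c rest' ih =>
    intro pre lines
    rw [PySem.List.enumerate_cons]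
    simp only [loopA]
    have hplaced : PySem.List.enumerate pre 1 ++ [((pre.length : Int) + 1, c)]
        = PySem.List.enumerate (pre ++ [c]) 1 := by
      rw [PySem.List.enumerate_append]
      simp [PySem.List.enumerate_cons, PySem.List.enumerate_nil]
      ring_nf
    have hrows : ∀ p ∈ PySem.List.enumerate (pre ++ [c]) 1, p.1 < (pre.length : Int) + 1 + 1 := by
      intro p hp
      have := mem_enumerate_fst_lt _ _ _ hp
      simp at this
      omega
    have ih' := ih (pre ++ [c])
    have hlen : (((pre ++ [c]).length : Int)) = (pre.length : Int) + 1 := by simp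
    rw [hlen] at ih'
    rw [hplaced, ih']
    have hassoc : (pre ++ [c]) ++ rest' = pre ++ c :: rest' := by simp
    rw [hassoc]
    rw [List.map_cons, List.flatMap_cons]
    have hstep : stepBlockB N ((pre.length : Int) + 1) c
        (PySem.List.enumerate (PySem.List.slice (pre ++ c :: rest') none (some ((pre.length : Int) + 1))) 1)
        = (["Step " ++ PySem.Int.toStr ((pre.length : Int) + 1) ++ ": Place queen in row " ++ PySem.Int.toStr ((pre.length : Int) + 1) ++ " at column " ++ PySem.Int.toStr c ++ "."]
           ++ ["  Placed: [" ++ placedStr (PySem.List.enumerate (pre ++ [c]) 1) ++ "]"]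
           ++ (if (pre.length : Int) + 1 < N then
                ["  Available for row " ++ PySem.Int.toStr ((pre.length : Int) + 1 + 1) ++ ": [" ++ PySem.Str.join ", " ((availA N (PySem.List.enumerate (pre ++ [c]) 1) ((pre.length : Int) + 1 + 1)).map PySem.Int.toStr) ++ "]"]
              else [])) := by
      rw [slice_prefix]
      unfold stepBlockB
      rw [availB_eq_availA _ _ _ hrows]
      by_cases hkN : (pre.length : Int) + 1 < N <;> simp [hkN]
    rw [hstep]
    by_cases hkN : (pre.length : Int) + 1 < N <;> simp [hkN, List.append_assoc]

-- ===== VERDICT (by name: the statement is the Claim_ definition above) =====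
theorem format_gold_trajectory_spec : Claim_equal_format_gold_trajectory := by
  intro N solution _
  unfold Spec_format_gold_trajectory format_gold_trajectory format_gold_trajectory_alt
  have h := loopA_eq N solution [] ["Board size: " ++ PySem.Int.toStr N]
  simp only [List.length_nil, Nat.cast_zero, zero_add, PySem.List.enumerate_nil, List.nil_append] at h
  rw [h]
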